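-- pv_equiv track=rewrite | github.com/Youyu-eyes/codeforces-classification | sliding window and two points/two points/1883G1. Dances (Easy version).py | solve
-- ===== SOURCE A (Python) =====
-- def solve(n, a, b):
--     a.sort()
--     b.sort()
--     p1 = p2 = 0
--     while p2 < n:
--         if a[p1] < b[p2]:
--             p1 += 1
--             p2 += 1
--         else:
--             p2 += 1
--     return n - p1
-- ===== SOURCE B (Python) =====
-- def solve(n, a, b):
--     a.sort()
--     b.sort()
--     # minimal number m of unmatched b-elements: feasibility "drop the m smallest
--     # a-elements, then match a[i] with b[i+m]" is monotone in m; binary-search the least m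
--     lo, hi = 0, n
--     while lo < hi:
--         mid = (lo + hi) // 2
--         if all(a[i] < b[i + mid] for i in range(n - mid)):
--             hi = mid
--         else:
--             lo = mid + 1
--     return hi
-- ===== Notes on version B (the rewrite author's own statement) =====
-- stated objective: alternative
-- what changed: Replaces the greedy two-pointer scan by a binary search over m in [0,n] for the least m such that a[i] < b[i+m] for all i < n-m (feasibility is monotone in m because b is sorted); that least m equals n minus the maximum matching. Pre_ restricts to the natural domain n <= len(a) and n <= len(b); outside it A usually raises IndexError, and on the stalled scans where A still returns a value B returns the same value (the carve-out is only because out-of-range indexing makes the behaviour accidental there).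
-- outside the precondition, e.g. on solve(2, [1], [0, 2]): A returns 1, B returns 1
import Mathlib
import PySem

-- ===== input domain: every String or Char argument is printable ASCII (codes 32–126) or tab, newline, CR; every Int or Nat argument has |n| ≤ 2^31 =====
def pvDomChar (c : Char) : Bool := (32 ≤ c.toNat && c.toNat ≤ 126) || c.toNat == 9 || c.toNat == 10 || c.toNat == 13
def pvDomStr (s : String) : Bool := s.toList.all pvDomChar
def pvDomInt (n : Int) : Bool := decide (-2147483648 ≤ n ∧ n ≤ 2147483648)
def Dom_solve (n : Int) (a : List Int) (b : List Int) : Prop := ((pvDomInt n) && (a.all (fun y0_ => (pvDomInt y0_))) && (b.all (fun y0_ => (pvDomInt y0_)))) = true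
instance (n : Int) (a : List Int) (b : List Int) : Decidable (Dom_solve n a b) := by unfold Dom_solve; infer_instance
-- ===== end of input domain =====

-- B replaces A's greedy two-pointer scan by a binary search for the least feasible number of
-- unmatched elements (alternative algorithm, same cost class); both sort their list arguments
-- in place in Python — the equivalence proved here is about the return value.


-- ===== PORT A =====
-- the two-pointer while loop; fuel = number of remaining iterations (n - p2); none = IndexError
def solveGo (a b : List Int) : Nat → Int → Int → Option Int
  | 0, p1, _ => some p1
  | fuel+1, p1, p2 =>
    match PySem.List.pyGet? a p1, PySem.List.pyGet? b p2 with
    | some x, some y =>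
        if x < y then solveGo a b fuel (p1 + 1) (p2 + 1)
        else solveGo a b fuel p1 (p2 + 1)
    | _, _ => none

def solve (n : Int) (a : List Int) (b : List Int) : Int :=
  let as := PySem.List.sorted a (fun x => x) false
  let bs := PySem.List.sorted b (fun x => x) false
  match solveGo as bs n.toNat 0 0 with
  | some p1 => n - p1
  | none => 0    -- unreachable under Pre_solve (the Python raises IndexError there)

-- ===== PORT B =====
-- all(a[i] < b[i + m] for i in range(n - m)); Pre_solve keeps every index in range,
-- so pyGetD's default is never read
def feasB (n : Int) (a b : List Int) (m : Int) : Bool :=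
  (PySem.List.pyRange 0 (n - m) 1).all
    (fun i => decide (PySem.List.pyGetD a i 0 < PySem.List.pyGetD b (i + m) 0))

-- the binary-search while loop; fuel = hi - lo at entry bounds the iteration count
def bsGo (n : Int) (a b : List Int) : Nat → Int → Int → Int
  | 0, _, hi => hi
  | fuel+1, lo, hi =>
    if lo < hi then
      let mid := PySem.Int.floordiv (lo + hi) 2
      if feasB n a b mid then bsGo n a b fuel lo mid
      else bsGo n a b fuel (mid + 1) hi
    else hi

def solve_alt (n : Int) (a : List Int) (b : List Int) : Int :=
  let as := PySem.List.sorted a (fun x => x) false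
  let bs := PySem.List.sorted b (fun x => x) false
  bsGo n as bs n.toNat 0 n

-- ===== PRECONDITION & SPEC =====
-- Pre_ restricts to the problem's natural domain n ≤ len(a) and n ≤ len(b); outside it the
-- Python A usually raises IndexError; on the stalled scans where A still returns a value,
-- B returns the same value (both behaviours there are accidents of out-of-range indexing).
def Pre_solve (n : Int) (a : List Int) (b : List Int) : Prop :=
  n ≤ (a.length : Int) ∧ n ≤ (b.length : Int)
instance (n : Int) (a : List Int) (b : List Int) : Decidable (Pre_solve n a b) := by
  unfold Pre_solve; infer_instance
def pvWitness_solve : Int × List Int × List Int := (2, [1, 3], [2, 2])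

def Spec_solve (n : Int) (a : List Int) (b : List Int) (out : Int) : Prop := out = solve_alt n a b
instance (n : Int) (a : List Int) (b : List Int) (out : Int) : Decidable (Spec_solve n a b out) := by unfold Spec_solve; infer_instance

-- ===== CLAIM (what is proved, stated in full; the proofs are below) =====
def Claim_equal_solve : Prop := ∀ (n : Int) (a : List Int) (b : List Int), Dom_solve n a b → Pre_solve n a b → Spec_solve n a b (solve n a b)

-- ===== LEMMAS AND PROOFS =====

-- feasibility with t = n - m elements matched: a[i] < b[(N - t) + i] for all i < t
def Gd (A B : List Int) (N t : Nat) : Prop :=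
  ∀ i : Nat, i < t → A.getD i 0 < B.getD (N - t + i) 0

theorem Gd_succ_imp (A B : List Int) (N t : Nat)
    (hB : ∀ p q : Nat, p ≤ q → q < B.length → B.getD p 0 ≤ B.getD q 0)
    (hNB : N ≤ B.length) (ht : t + 1 ≤ N) (h : Gd A B N (t+1)) : Gd A B N t := by
  intro i hi
  have h1 := h i (by omega)
  have h2 : B.getD (N - (t+1) + i) 0 ≤ B.getD (N - t + i) 0 :=
    hB (N - (t+1) + i) (N - t + i) (by omega) (by omega)
  omega

theorem Gd_mono (A B : List Int) (N : Nat)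
    (hB : ∀ p q : Nat, p ≤ q → q < B.length → B.getD p 0 ≤ B.getD q 0)
    (hNB : N ≤ B.length) :
    ∀ s : Nat, s ≤ N → Gd A B N s → ∀ t : Nat, t ≤ s → Gd A B N t := by
  intro s
  induction s with
  | zero => intro _ h t ht; simpa [Nat.le_zero.mp ht] using h
  | succ s ih =>
    intro hs h t ht
    rcases Nat.lt_or_ge t (s+1) with h' | h'
    · exact ih (by omega) (Gd_succ_imp A B N s hB hNB hs h) t (by omega)
    · have : t = s + 1 := by omega
      subst this; exact h

theorem greedy_inv (A B : List Int) (N : Nat)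
    (hNA : N ≤ A.length) (hNB : N ≤ B.length)
    (hB : ∀ p q : Nat, p ≤ q → q < B.length → B.getD p 0 ≤ B.getD q 0) :
    ∀ (k p1 p2 : Nat), p2 + k = N → p1 ≤ p2 →
      Gd A B p2 p1 → (∀ t, p1 < t → t ≤ p2 → ¬ Gd A B p2 t) →
      ∃ q : Nat, solveGo A B k (p1 : Int) (p2 : Int) = some (q : Int) ∧ q ≤ N ∧
        Gd A B N q ∧ (∀ t, q < t → t ≤ N → ¬ Gd A B N t) := by
  intro k
  induction k with
  | zero =>
    intro p1 p2 hk hle hG hmax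
    have hp2 : p2 = N := by omega
    subst hp2
    exact ⟨p1, rfl, by omega, hG, hmax⟩
  | succ k ih =>
    intro p1 p2 hk hle hG hmax
    have hp1A : p1 < A.length := by omega
    have hp2B : p2 < B.length := by omega
    have ha := PySem.List.pyGet?_ofNat (xs := A) (n := p1) hp1A
    have hb := PySem.List.pyGet?_ofNat (xs := B) (n := p2) hp2B
    have hgetA : A.getD p1 0 = A[p1] := List.getD_eq_getElem A 0 hp1A
    have hgetB : B.getD p2 0 = B[p2] := List.getD_eq_getElem B 0 hp2B
    by_cases hc : A[p1] < B[p2]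
    · -- match: advance both pointers
      have hG' : Gd A B (p2+1) (p1+1) := by
        intro i hi
        rcases Nat.lt_or_ge i p1 with h' | h'
        · rw [show p2 + 1 - (p1 + 1) + i = p2 - p1 + i from by omega]
          exact hG i h'
        · have hip : i = p1 := by omega
          subst hip
          rw [show p2 + 1 - (i + 1) + i = p2 from by omega, hgetA, hgetB]
          exact hc
      have hmax' : ∀ t, p1 + 1 < t → t ≤ p2 + 1 → ¬ Gd A B (p2+1) t := by
        intro t h1 h2 hGt
        refine hmax (t-1) (by omega) (by omega) ?_
        intro i hi
        have hh := hGt i (by omega)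
        rw [show p2 + 1 - t + i = p2 - (t-1) + i from by omega] at hh
        exact hh
      obtain ⟨q, hq, h1, h2, h3⟩ := ih (p1+1) (p2+1) (by omega) (by omega) hG' hmax'
      refine ⟨q, ?_, h1, h2, h3⟩
      simp only [solveGo, ha, hb, if_pos hc]
      rw [← hq]; norm_cast
    · -- no match: advance only p2
      have hG' : Gd A B (p2+1) p1 := by
        intro i hi
        have h1 := hG i hi
        have h2 : B.getD (p2 - p1 + i) 0 ≤ B.getD (p2 + 1 - p1 + i) 0 :=
          hB (p2 - p1 + i) (p2 + 1 - p1 + i) (by omega) (by omega)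
        omega
      have hmax' : ∀ t, p1 < t → t ≤ p2 + 1 → ¬ Gd A B (p2+1) t := by
        intro t h1 h2 hGt
        rcases Nat.lt_or_ge (p1+1) t with h' | h'
        · refine hmax (t-1) (by omega) (by omega) ?_
          intro i hi
          have hh := hGt i (by omega)
          rw [show p2 + 1 - t + i = p2 - (t-1) + i from by omega] at hh
          exact hh
        · have ht : t = p1 + 1 := by omega
          subst ht
          have hh := hGt p1 (by omega)
          rw [show p2 + 1 - (p1 + 1) + p1 = p2 from by omega, hgetA, hgetB] at hh
          exact hc hh
      obtain ⟨q, hq, h1, h2, h3⟩ := ih p1 (p2+1) (by omega) (by omega) hG' hmax'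
      refine ⟨q, ?_, h1, h2, h3⟩
      simp only [solveGo, ha, hb, if_neg hc]
      rw [← hq]; norm_cast

theorem feasB_iff (A B : List Int) (n m : Int) (hn : 0 ≤ n) (hm0 : 0 ≤ m) (hmn : m ≤ n) :
    feasB n A B m = true ↔ Gd A B n.toNat (n - m).toNat := by
  unfold feasB Gd
  rw [List.all_eq_true]
  constructor
  · intro h i hi
    have hmem : (i : Int) ∈ PySem.List.pyRange 0 (n - m) 1 := by
      rw [PySem.List.mem_pyRange_one]; omega
    have := h _ hmem
    rw [decide_eq_true_iff] at this
    rw [PySem.List.pyGetD_natCast] at this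
    have hcast : (i : Int) + m = ((n.toNat - (n - m).toNat + i : Nat) : Int) := by
      push_cast; omega
    rw [hcast, PySem.List.pyGetD_natCast] at this
    exact this
  · intro h x hx
    rw [PySem.List.mem_pyRange_one] at hx
    rw [decide_eq_true_iff]
    have hx0 : x = (x.toNat : Int) := by omega
    have := h x.toNat (by omega)
    rw [hx0, PySem.List.pyGetD_natCast]
    have hcast : (x.toNat : Int) + m = ((n.toNat - (n - m).toNat + x.toNat : Nat) : Int) := by
      push_cast; omega
    rw [hcast, PySem.List.pyGetD_natCast]
    exact this

theorem bs_correct (n : Int) (A B : List Int) (L : Int)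
    (H : ∀ m : Int, 0 ≤ m → m < n → (feasB n A B m = true ↔ L ≤ m)) :
    ∀ (fuel : Nat) (lo hi : Int), 0 ≤ lo → lo ≤ L → L ≤ hi → hi ≤ n →
      hi - lo ≤ (fuel : Int) → bsGo n A B fuel lo hi = L := by
  intro fuel
  induction fuel with
  | zero =>
    intro lo hi h0 h1 h2 h3 h4
    simp only [bsGo]; omega
  | succ fuel ih =>
    intro lo hi h0 h1 h2 h3 h4
    by_cases hlt : lo < hi
    · have hmid := PySem.Int.floordiv_two_mid_bounds (lo := lo) (hi := hi) (by omega)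
      have hmidlt : PySem.Int.floordiv (lo + hi) 2 < hi := by
        rw [PySem.Int.floordiv_lt_iff_lt_mul (by omega)]; omega
      set mid := PySem.Int.floordiv (lo + hi) 2 with hmiddef
      have hHm := H mid (by omega) (by omega)
      by_cases hf : feasB n A B mid = true
      · have hLm : L ≤ mid := hHm.mp hf
        simp only [bsGo, if_pos hlt, ← hmiddef, hf, if_pos]
        exact ih lo mid h0 h1 hLm (by omega) (by omega)
      · have hf' : feasB n A B mid = false := by simpa using hf
        have hLm : mid + 1 ≤ L := by
          have := hHm.not.mp (by simp [hf'])
          omega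
        simp only [bsGo, if_pos hlt, ← hmiddef, hf', Bool.false_eq_true, if_false]
        exact ih (mid+1) hi (by omega) hLm h2 h3 (by omega)
    · simp only [bsGo, if_neg hlt]; omega

-- ===== VERDICT (by name: the statement is the Claim_ definition above) =====
theorem solve_spec : Claim_equal_solve := by
  intro n a b _ hpre
  obtain ⟨hpa, hpb⟩ := hpre
  unfold Spec_solve
  set A := PySem.List.sorted a (fun x => x) false with hA
  set B := PySem.List.sorted b (fun x => x) false with hBdef
  have e1 : solve n a b = (match solveGo A B n.toNat 0 0 with | some p1 => n - p1 | none => 0) := rfl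
  have e2 : solve_alt n a b = bsGo n A B n.toNat 0 n := rfl
  have hlenA : A.length = a.length := by rw [hA]; exact PySem.List.length_sorted ..
  have hlenB : B.length = b.length := by rw [hBdef]; exact PySem.List.length_sorted ..
  rcases Int.lt_or_le n 0 with hneg | hn0
  · -- n < 0: no loop iteration on either side
    rw [e1, e2, show n.toNat = 0 from by omega]
    show n - 0 = n
    omega
  · -- 0 ≤ n
    have hBmono : ∀ p q : Nat, p ≤ q → q < B.length → B.getD p 0 ≤ B.getD q 0 := by
      intro p q hpq hq
      have hp : p < B.length := by omega
      rw [List.getD_eq_getElem B 0 hp, List.getD_eq_getElem B 0 hq]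
      exact PySem.List.sorted_id_getElem_mono (xs := b) (p := p) (q := q) hpq (by rw [← hBdef] at *; omega)
    set N := n.toNat with hN
    have hNA : N ≤ A.length := by omega
    have hNB : N ≤ B.length := by omega
    obtain ⟨q, hgo, hqN, hGq, hmax⟩ :=
      greedy_inv A B N hNA hNB hBmono N 0 0 (by omega) (le_refl 0)
        (by intro i hi; omega) (by intro t h1 h2; omega)
    have hcast0 : ((0 : Nat) : Int) = 0 := rfl
    rw [hcast0] at hgo
    rw [e1, e2, hN] at *
    rw [hgo]
    show n - (q : Int) = bsGo n A B n.toNat 0 n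
    have hH : ∀ m : Int, 0 ≤ m → m < n → (feasB n A B m = true ↔ (n - (q : Int)) ≤ m) := by
      intro m hm0 hmn
      rw [feasB_iff A B n m hn0 hm0 (by omega)]
      constructor
      · intro hG
        by_contra hcon
        have ht1 : q < (n - m).toNat := by omega
        have ht2 : (n - m).toNat ≤ N := by omega
        exact hmax _ ht1 ht2 hG
      · intro hLm
        have := Gd_mono A B N hBmono hNB q hqN hGq (n - m).toNat (by omega)
        exact this
    exact (bs_correct n A B (n - (q : Int)) hH N 0 n (le_refl 0) (by omega) (by omega)
      (le_refl n) (by omega)).symm
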